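-- pv_equiv track=rewrite | github.com/git-vinks/modelo_vinks | app_cultura_final.py | generar_recomendaciones_desde_feedback
-- ===== SOURCE A (Python) =====
-- def generar_recomendaciones_desde_feedback(temas_negativos, demografia_afectada):
--     recommendations = {}
--
--     tasks_temas = []
--     palabras_clave = [tema[0] for tema in temas_negativos]
--
--     mapa_temas = {
--         ("comunicacion", "informacion", "transparencia"): {
--             "problema": "la comunicación interna parece ser un punto de dolor.",
--             "accion": "implementar reuniones generales quincenales y crear un boletín semanal con actualizaciones clave."
--         },
--         ("salario", "sueldo", "compensacion", "paga"): {
--             "problema": "existe insatisfacción con la compensación.",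
--             "accion": "realizar un estudio de mercado de salarios para asegurar la competitividad y comunicar claramente la política de compensación."
--         },
--         ("lider", "jefe", "gerente", "liderazgo"): {
--             "problema": "el estilo de liderazgo o la gestión directa está generando fricción.",
--             "accion": "lanzar un programa de capacitación para gerentes enfocado en retroalimentación constructiva y comunicación efectiva."
--         },
--         ("carga", "trabajo", "estres", "horario", "horas"): {
--             "problema": "hay una percepción de sobrecarga de trabajo y posible agotamiento.",
--             "accion": "revisar la distribución de tareas en los equipos más afectados y promover activamente políticas de desconexión digital."
--         },
--         ("crecimiento", "carrera", "oportunidades", "desarrollo"): {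
--             "problema": "los empleados no perciben un camino claro de desarrollo profesional.",
--             "accion": "definir y comunicar planes de carrera claros para cada rol y asignar presupuestos para formación y certificaciones."
--         },
--         ("reconocimiento", "valorado", "gracias"): {
--             "problema": "existe una falta de reconocimiento por el trabajo bien realizado.",
--             "accion": "crear un programa de reconocimiento entre pares y capacitar a los líderes para entregar retroalimentación positiva de forma regular."
--         }
--     }
--
--     for keywords, details in mapa_temas.items():
--         if any(palabra in palabras_clave for palabra in keywords):
--             tasks_temas.append(f"**problema:** {details['problema']} **acción sugerida:** {details['accion']}")
--
--     if tasks_temas: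
--         recommendations['temas críticos'] = tasks_temas
--
--     tasks_demografia = []
--     if 'rol' in demografia_afectada:
--         rol = demografia_afectada['rol']
--         tasks_demografia.append(f"el rol de **{rol}** concentra la mayor cantidad de retroalimentación negativa. **acción sugerida:** organice una sesión de grupo focal con este colectivo para profundizar en sus preocupaciones específicas.")
--
--     if 'edad' in demografia_afectada:
--         edad = demografia_afectada['edad']
--         tasks_demografia.append(f"el grupo etario de **{edad} años** muestra una mayor insatisfacción. **acción sugerida:** analice si las políticas de beneficios y desarrollo profesional están alineadas con las expectativas de esta generación.")
--
--     if 'genero' in demografia_afectada: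
--         genero = demografia_afectada['genero']
--         tasks_demografia.append(f"se ha detectado una mayor prevalencia de comentarios negativos en el género **{genero}**. **acción sugerida:** revise las políticas de equidad, inclusión y oportunidades de crecimiento para asegurar que no existan sesgos inconscientes.")
--
--     if tasks_demografia:
--         recommendations['grupos de enfoque'] = tasks_demografia
--
--     return recommendations
-- ===== SOURCE B (Python) =====
-- _TEMAS = [
--     ("la comunicación interna parece ser un punto de dolor.",
--      "implementar reuniones generales quincenales y crear un boletín semanal con actualizaciones clave."),
--     ("existe insatisfacción con la compensación.",
--      "realizar un estudio de mercado de salarios para asegurar la competitividad y comunicar claramente la política de compensación."),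
--     ("el estilo de liderazgo o la gestión directa está generando fricción.",
--      "lanzar un programa de capacitación para gerentes enfocado en retroalimentación constructiva y comunicación efectiva."),
--     ("hay una percepción de sobrecarga de trabajo y posible agotamiento.",
--      "revisar la distribución de tareas en los equipos más afectados y promover activamente políticas de desconexión digital."),
--     ("los empleados no perciben un camino claro de desarrollo profesional.",
--      "definir y comunicar planes de carrera claros para cada rol y asignar presupuestos para formación y certificaciones."),
--     ("existe una falta de reconocimiento por el trabajo bien realizado.",
--      "crear un programa de reconocimiento entre pares y capacitar a los líderes para entregar retroalimentación positiva de forma regular."),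
-- ]
--
-- _INDEX = {
--     "comunicacion": 0, "informacion": 0, "transparencia": 0,
--     "salario": 1, "sueldo": 1, "compensacion": 1, "paga": 1,
--     "lider": 2, "jefe": 2, "gerente": 2, "liderazgo": 2,
--     "carga": 3, "trabajo": 3, "estres": 3, "horario": 3, "horas": 3,
--     "crecimiento": 4, "carrera": 4, "oportunidades": 4, "desarrollo": 4,
--     "reconocimiento": 5, "valorado": 5, "gracias": 5,
-- }
--
-- _PLANTILLAS = [
--     ("rol", lambda v: f"el rol de **{v}** concentra la mayor cantidad de retroalimentación negativa. **acción sugerida:** organice una sesión de grupo focal con este colectivo para profundizar en sus preocupaciones específicas."),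
--     ("edad", lambda v: f"el grupo etario de **{v} años** muestra una mayor insatisfacción. **acción sugerida:** analice si las políticas de beneficios y desarrollo profesional están alineadas con las expectativas de esta generación."),
--     ("genero", lambda v: f"se ha detectado una mayor prevalencia de comentarios negativos en el género **{v}**. **acción sugerida:** revise las políticas de equidad, inclusión y oportunidades de crecimiento para asegurar que no existan sesgos inconscientes."),
-- ]
--
--
-- def generar_recomendaciones_desde_feedback(temas_negativos, demografia_afectada):
--     matched = set()
--     for tema in temas_negativos:
--         idx = _INDEX.get(tema[0])
--         if idx is not None:
--             matched.add(idx)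
--
--     tasks_temas = [f"**problema:** {p} **acción sugerida:** {a}"
--                    for i, (p, a) in enumerate(_TEMAS) if i in matched]
--
--     tasks_demografia = [fmt(demografia_afectada[k])
--                         for k, fmt in _PLANTILLAS if k in demografia_afectada]
--
--     recommendations = {}
--     if tasks_temas:
--         recommendations['temas críticos'] = tasks_temas
--     if tasks_demografia:
--         recommendations['grupos de enfoque'] = tasks_demografia
--     return recommendations
-- ===== Notes on version B (the rewrite author's own statement) =====
-- stated objective: alternative
-- what changed: Replaces the per-theme keyword scans (for each of the 6 themes, an 'any kw in palabras_clave' membership scan) with a precomputed inverted keyword->theme-index dict: one pass over temas_negativos collects matched theme indices into a set, then the fixed theme table is filtered in order; the three demographic if-blocks become one comprehension over a (key, template) list.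
import Mathlib
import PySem

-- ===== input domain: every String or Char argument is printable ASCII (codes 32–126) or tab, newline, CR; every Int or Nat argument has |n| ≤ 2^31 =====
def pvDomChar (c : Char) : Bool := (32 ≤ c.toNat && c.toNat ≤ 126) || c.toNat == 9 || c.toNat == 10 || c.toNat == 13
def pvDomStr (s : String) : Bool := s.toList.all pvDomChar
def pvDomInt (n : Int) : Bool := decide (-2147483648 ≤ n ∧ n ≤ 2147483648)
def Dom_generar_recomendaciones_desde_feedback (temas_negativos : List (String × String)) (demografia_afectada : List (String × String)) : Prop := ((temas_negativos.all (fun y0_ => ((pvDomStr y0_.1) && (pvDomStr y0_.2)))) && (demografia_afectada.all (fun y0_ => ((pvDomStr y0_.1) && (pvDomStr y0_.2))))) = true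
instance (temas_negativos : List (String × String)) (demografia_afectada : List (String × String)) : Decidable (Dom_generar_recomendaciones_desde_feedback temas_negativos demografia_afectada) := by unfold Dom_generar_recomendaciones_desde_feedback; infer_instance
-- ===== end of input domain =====

-- B replaces A's six per-theme keyword scans over the input with a precomputed inverted keyword→theme index,
-- one pass collecting matched theme indices into a set, and a filter of the theme table; objective: alternative.

-- ===== PORT A =====
-- mapa_temas: list of (keywords tuple, (problema, accion)) in the dict's literal insertion order
def pvMapaTemas : List (List String × String × String) := [
  (["comunicacion", "informacion", "transparencia"],
   "la comunicación interna parece ser un punto de dolor.",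
   "implementar reuniones generales quincenales y crear un boletín semanal con actualizaciones clave."),
  (["salario", "sueldo", "compensacion", "paga"],
   "existe insatisfacción con la compensación.",
   "realizar un estudio de mercado de salarios para asegurar la competitividad y comunicar claramente la política de compensación."),
  (["lider", "jefe", "gerente", "liderazgo"],
   "el estilo de liderazgo o la gestión directa está generando fricción.",
   "lanzar un programa de capacitación para gerentes enfocado en retroalimentación constructiva y comunicación efectiva."),
  (["carga", "trabajo", "estres", "horario", "horas"],
   "hay una percepción de sobrecarga de trabajo y posible agotamiento.",
   "revisar la distribución de tareas en los equipos más afectados y promover activamente políticas de desconexión digital."),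
  (["crecimiento", "carrera", "oportunidades", "desarrollo"],
   "los empleados no perciben un camino claro de desarrollo profesional.",
   "definir y comunicar planes de carrera claros para cada rol y asignar presupuestos para formación y certificaciones."),
  (["reconocimiento", "valorado", "gracias"],
   "existe una falta de reconocimiento por el trabajo bien realizado.",
   "crear un programa de reconocimiento entre pares y capacitar a los líderes para entregar retroalimentación positiva de forma regular.")]

def generar_recomendaciones_desde_feedback (temas_negativos : List (String × String)) (demografia_afectada : List (String × String)) : List (String × List String) :=
  let palabras_clave := temas_negativos.map (fun tema => tema.1)
  -- for keywords, details in mapa_temas.items(): if any(palabra in palabras_clave for palabra in keywords): tasks_temas.append(...)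
  let tasks_temas := pvMapaTemas.foldl (fun acc e =>
    if e.1.any (fun palabra => palabras_clave.contains palabra)
    then acc ++ ["**problema:** " ++ e.2.1 ++ " **acción sugerida:** " ++ e.2.2]
    else acc) []
  let d := PySem.Dict.ofList demografia_afectada
  -- three if-blocks: if 'rol' in demografia_afectada: …, etc.
  let tasks_demografia :=
    (match d.get? "rol" with
     | some rol => ["el rol de **" ++ rol ++ "** concentra la mayor cantidad de retroalimentación negativa. **acción sugerida:** organice una sesión de grupo focal con este colectivo para profundizar en sus preocupaciones específicas."]
     | none => []) ++
    (match d.get? "edad" with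
     | some edad => ["el grupo etario de **" ++ edad ++ " años** muestra una mayor insatisfacción. **acción sugerida:** analice si las políticas de beneficios y desarrollo profesional están alineadas con las expectativas de esta generación."]
     | none => []) ++
    (match d.get? "genero" with
     | some genero => ["se ha detectado una mayor prevalencia de comentarios negativos en el género **" ++ genero ++ "**. **acción sugerida:** revise las políticas de equidad, inclusión y oportunidades de crecimiento para asegurar que no existan sesgos inconscientes."]
     | none => [])
  (if tasks_temas.isEmpty then [] else [("temas críticos", tasks_temas)]) ++
  (if tasks_demografia.isEmpty then [] else [("grupos de enfoque", tasks_demografia)])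

-- ===== PORT B =====
def pvTemasAlt : List (String × String) := [
  ("la comunicación interna parece ser un punto de dolor.",
   "implementar reuniones generales quincenales y crear un boletín semanal con actualizaciones clave."),
  ("existe insatisfacción con la compensación.",
   "realizar un estudio de mercado de salarios para asegurar la competitividad y comunicar claramente la política de compensación."),
  ("el estilo de liderazgo o la gestión directa está generando fricción.",
   "lanzar un programa de capacitación para gerentes enfocado en retroalimentación constructiva y comunicación efectiva."),
  ("hay una percepción de sobrecarga de trabajo y posible agotamiento.",
   "revisar la distribución de tareas en los equipos más afectados y promover activamente políticas de desconexión digital."),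
  ("los empleados no perciben un camino claro de desarrollo profesional.",
   "definir y comunicar planes de carrera claros para cada rol y asignar presupuestos para formación y certificaciones."),
  ("existe una falta de reconocimiento por el trabajo bien realizado.",
   "crear un programa de reconocimiento entre pares y capacitar a los líderes para entregar retroalimentación positiva de forma regular.")]

-- inverted index keyword → theme index (literal dict in Source B)
def pvIndex : PySem.Dict String Int := PySem.Dict.mk [
  ("comunicacion", 0), ("informacion", 0), ("transparencia", 0),
  ("salario", 1), ("sueldo", 1), ("compensacion", 1), ("paga", 1),
  ("lider", 2), ("jefe", 2), ("gerente", 2), ("liderazgo", 2),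
  ("carga", 3), ("trabajo", 3), ("estres", 3), ("horario", 3), ("horas", 3),
  ("crecimiento", 4), ("carrera", 4), ("oportunidades", 4), ("desarrollo", 4),
  ("reconocimiento", 5), ("valorado", 5), ("gracias", 5)]

def pvPlantillas : List (String × (String → String)) := [
  ("rol", fun v => "el rol de **" ++ v ++ "** concentra la mayor cantidad de retroalimentación negativa. **acción sugerida:** organice una sesión de grupo focal con este colectivo para profundizar en sus preocupaciones específicas."),
  ("edad", fun v => "el grupo etario de **" ++ v ++ " años** muestra una mayor insatisfacción. **acción sugerida:** analice si las políticas de beneficios y desarrollo profesional están alineadas con las expectativas de esta generación."),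
  ("genero", fun v => "se ha detectado una mayor prevalencia de comentarios negativos en el género **" ++ v ++ "**. **acción sugerida:** revise las políticas de equidad, inclusión y oportunidades de crecimiento para asegurar que no existan sesgos inconscientes.")]

def generar_recomendaciones_desde_feedback_alt (temas_negativos : List (String × String)) (demografia_afectada : List (String × String)) : List (String × List String) :=
  -- matched = set(); for tema in temas_negativos: idx = _INDEX.get(tema[0]); if idx is not None: matched.add(idx)
  let matched := temas_negativos.foldl (fun s tema =>
    match pvIndex.get? tema.1 with
    | some i => PySem.Set.add s i
    | none => s) PySem.Set.empty
  let tasks_temas := ((PySem.List.enumerate pvTemasAlt).filter (fun e => matched.contains e.1)).map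
    (fun e => "**problema:** " ++ e.2.1 ++ " **acción sugerida:** " ++ e.2.2)
  let d := PySem.Dict.ofList demografia_afectada
  let tasks_demografia := pvPlantillas.filterMap (fun e => (d.get? e.1).map e.2)
  (if tasks_temas.isEmpty then [] else [("temas críticos", tasks_temas)]) ++
  (if tasks_demografia.isEmpty then [] else [("grupos de enfoque", tasks_demografia)])

-- ===== PRECONDITION & SPEC =====
def Spec_generar_recomendaciones_desde_feedback (temas_negativos : List (String × String)) (demografia_afectada : List (String × String)) (out : List (String × List String)) : Prop := out = generar_recomendaciones_desde_feedback_alt temas_negativos demografia_afectada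
instance (temas_negativos : List (String × String)) (demografia_afectada : List (String × String)) (out : List (String × List String)) : Decidable (Spec_generar_recomendaciones_desde_feedback temas_negativos demografia_afectada out) := by unfold Spec_generar_recomendaciones_desde_feedback; infer_instance

-- ===== CLAIM (what is proved, stated in full; the proofs are below) =====
def Claim_equal_generar_recomendaciones_desde_feedback : Prop := ∀ (temas_negativos : List (String × String)) (demografia_afectada : List (String × String)), Dom_generar_recomendaciones_desde_feedback temas_negativos demografia_afectada → Spec_generar_recomendaciones_desde_feedback temas_negativos demografia_afectada (generar_recomendaciones_desde_feedback temas_negativos demografia_afectada)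

-- ===== LEMMAS AND PROOFS =====

-- membership in the match-collecting fold
theorem pv_matched_contains (tn : List (String × String)) (s : PySem.Set Int) (i : Int) :
    (tn.foldl (fun s tema =>
      match pvIndex.get? tema.1 with
      | some j => PySem.Set.add s j
      | none => s) s).contains i
    = (s.contains i || tn.any (fun t => pvIndex.get? t.1 == some i)) := by
  induction tn generalizing s with
  | nil => simp
  | cons t ts ih =>
    cases h : pvIndex.get? t.1 <;>
      simp only [List.foldl_cons, h, ih, List.any_cons] <;>
      rw [Bool.eq_iff_iff] <;>
      simp [PySem.Set.mem_add] <;>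
      tauto

-- first-match lookup in a nodup-key literal dict, as a scan
-- first-match lookup in a nodup-key literal dict, as a scan
theorem pv_get?_any (w : String) (i : Int) : ∀ (l : List (String × Int)), (l.map (fun p => p.1)).Nodup →
    (((PySem.Dict.mk l).get? w) == some i) = l.any (fun p => p.1 == w && p.2 == i) := by
  intro l
  induction l with
  | nil => intro _; simp [PySem.Dict.get?]
  | cons p rest ih =>
    intro hnd
    simp only [List.map_cons, List.nodup_cons] at hnd
    rw [PySem.Dict.get?_mk_cons]
    by_cases h : p.1 = w
    · subst h
      have hrest : rest.any (fun q => q.1 == p.1 && q.2 == i) = false := by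
        rw [List.any_eq_false]
        intro q hq
        have hne : q.1 ≠ p.1 := fun he => hnd.1 (he ▸ List.mem_map_of_mem hq)
        simp [hne]
      simp [List.any_cons, hrest]
    · have hb : (p.1 == w) = false := beq_eq_false_iff_ne.mpr h
      simp [hb, ih hnd.2]

set_option maxRecDepth 8192 in
theorem pv_lookup0 (w : String) :
    (pvIndex.get? w == some 0) = (["comunicacion", "informacion", "transparencia"] : List String).contains w := by
  simp only [pvIndex]
  rw [pv_get?_any w 0 _ (by decide)]
  rw [Bool.eq_iff_iff]; simp; aesop

set_option maxRecDepth 8192 in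
theorem pv_lookup1 (w : String) :
    (pvIndex.get? w == some 1) = (["salario", "sueldo", "compensacion", "paga"] : List String).contains w := by
  simp only [pvIndex]
  rw [pv_get?_any w 1 _ (by decide)]
  rw [Bool.eq_iff_iff]; simp; aesop

set_option maxRecDepth 8192 in
theorem pv_lookup2 (w : String) :
    (pvIndex.get? w == some 2) = (["lider", "jefe", "gerente", "liderazgo"] : List String).contains w := by
  simp only [pvIndex]
  rw [pv_get?_any w 2 _ (by decide)]
  rw [Bool.eq_iff_iff]; simp; aesop

set_option maxRecDepth 8192 in
theorem pv_lookup3 (w : String) :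
    (pvIndex.get? w == some 3) = (["carga", "trabajo", "estres", "horario", "horas"] : List String).contains w := by
  simp only [pvIndex]
  rw [pv_get?_any w 3 _ (by decide)]
  rw [Bool.eq_iff_iff]; simp; aesop

set_option maxRecDepth 8192 in
theorem pv_lookup4 (w : String) :
    (pvIndex.get? w == some 4) = (["crecimiento", "carrera", "oportunidades", "desarrollo"] : List String).contains w := by
  simp only [pvIndex]
  rw [pv_get?_any w 4 _ (by decide)]
  rw [Bool.eq_iff_iff]; simp; aesop

set_option maxRecDepth 8192 in
theorem pv_lookup5 (w : String) :
    (pvIndex.get? w == some 5) = (["reconocimiento", "valorado", "gracias"] : List String).contains w := by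
  simp only [pvIndex]
  rw [pv_get?_any w 5 _ (by decide)]
  rw [Bool.eq_iff_iff]; simp; aesop

-- Prop-level corollaries
theorem pv_beq_some_iff {w : String} {l : List String} {o : Option Int} {i : Int}
    (h : (o == some i) = l.contains w) : o = some i ↔ w ∈ l := by
  constructor <;> intro h' <;> simp_all

theorem pv_lookupP0 (w : String) : pvIndex.get? w = some 0 ↔ w ∈ (["comunicacion", "informacion", "transparencia"] : List String) :=
  pv_beq_some_iff (pv_lookup0 w)

theorem pv_lookupP1 (w : String) : pvIndex.get? w = some 1 ↔ w ∈ (["salario", "sueldo", "compensacion", "paga"] : List String) :=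
  pv_beq_some_iff (pv_lookup1 w)

theorem pv_lookupP2 (w : String) : pvIndex.get? w = some 2 ↔ w ∈ (["lider", "jefe", "gerente", "liderazgo"] : List String) :=
  pv_beq_some_iff (pv_lookup2 w)

theorem pv_lookupP3 (w : String) : pvIndex.get? w = some 3 ↔ w ∈ (["carga", "trabajo", "estres", "horario", "horas"] : List String) :=
  pv_beq_some_iff (pv_lookup3 w)

theorem pv_lookupP4 (w : String) : pvIndex.get? w = some 4 ↔ w ∈ (["crecimiento", "carrera", "oportunidades", "desarrollo"] : List String) :=
  pv_beq_some_iff (pv_lookup4 w)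

theorem pv_lookupP5 (w : String) : pvIndex.get? w = some 5 ↔ w ∈ (["reconocimiento", "valorado", "gracias"] : List String) :=
  pv_beq_some_iff (pv_lookup5 w)

theorem pv_matched_mem (tn : List (String × String)) (i : Int) :
    i ∈ (tn.foldl (fun s tema =>
      match pvIndex.get? tema.1 with
      | some j => PySem.Set.add s j
      | none => s) ([] : PySem.Set Int)) ↔ ∃ t ∈ tn, pvIndex.get? t.1 = some i := by
  have h := pv_matched_contains tn PySem.Set.empty i
  simp only [PySem.Set.empty] at h
  rw [Bool.eq_iff_iff] at h
  simpa using h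

-- the paired filter-map principle used to line the two literal tables up
theorem pv_filter_map_pair {α β γ : Type} (c1 : α → Bool) (f1 : α → γ) (c2 : β → Bool) (f2 : β → γ) :
    ∀ (l1 : List α) (l2 : List β), List.Forall₂ (fun a b => c1 a = c2 b ∧ f1 a = f2 b) l1 l2 →
      (l1.filter c1).map f1 = (l2.filter c2).map f2 := by
  intro l1 l2 h
  induction h with
  | nil => rfl
  | @cons a b tl1 tl2 hab htl ih =>
    cases h : c1 a <;> simp [h, ← hab.1, hab.2, ih]

-- the demographic blocks agree
theorem pv_demo_eq (d : PySem.Dict String String) :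
    ((match d.get? "rol" with
     | some rol => ["el rol de **" ++ rol ++ "** concentra la mayor cantidad de retroalimentación negativa. **acción sugerida:** organice una sesión de grupo focal con este colectivo para profundizar en sus preocupaciones específicas."]
     | none => []) ++
    (match d.get? "edad" with
     | some edad => ["el grupo etario de **" ++ edad ++ " años** muestra una mayor insatisfacción. **acción sugerida:** analice si las políticas de beneficios y desarrollo profesional están alineadas con las expectativas de esta generación."]
     | none => []) ++
    (match d.get? "genero" with
     | some genero => ["se ha detectado una mayor prevalencia de comentarios negativos en el género **" ++ genero ++ "**. **acción sugerida:** revise las políticas de equidad, inclusión y oportunidades de crecimiento para asegurar que no existan sesgos inconscientes."]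
     | none => []))
    = pvPlantillas.filterMap (fun e => (d.get? e.1).map e.2) := by
  simp only [pvPlantillas, List.filterMap_cons, List.filterMap_nil]
  cases d.get? "rol" <;> cases d.get? "edad" <;> cases d.get? "genero" <;> simp

-- ===== VERDICT (by name: the statement is the Claim_ definition above) =====
set_option maxHeartbeats 1000000 in
theorem generar_recomendaciones_desde_feedback_spec : Claim_equal_generar_recomendaciones_desde_feedback := by
  intro tn da _
  unfold Spec_generar_recomendaciones_desde_feedback
  simp only [generar_recomendaciones_desde_feedback, generar_recomendaciones_desde_feedback_alt]
  rw [PySem.List.foldl_append_if, List.nil_append, pv_demo_eq (PySem.Dict.ofList da)]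
  have hpair : List.Forall₂
      (fun (a : List String × String × String) (b : Int × String × String) =>
        ((a.1.any fun palabra => (List.map (fun tema => tema.1) tn).contains palabra)
          = ((List.foldl (fun s tema => match pvIndex.get? tema.1 with | some i => PySem.Set.add s i | none => s) PySem.Set.empty tn).contains b.1))
        ∧ ("**problema:** " ++ a.2.1 ++ " **acción sugerida:** " ++ a.2.2
            = "**problema:** " ++ b.2.1 ++ " **acción sugerida:** " ++ b.2.2))
      pvMapaTemas (PySem.List.enumerate pvTemasAlt) := by
    simp only [pvMapaTemas, pvTemasAlt, PySem.List.enumerate_cons, PySem.List.enumerate_nil]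
    norm_num
    refine ⟨?_, ?_, ?_, ?_, ?_, ?_⟩
    · rw [Bool.eq_iff_iff]
      simp only [decide_eq_true_eq, Bool.or_eq_true, List.mem_map, pv_matched_mem]
      simp only [pv_lookupP0, List.mem_cons, List.not_mem_nil, or_false, and_or_left, exists_or]
    · rw [Bool.eq_iff_iff]
      simp only [decide_eq_true_eq, Bool.or_eq_true, List.mem_map, pv_matched_mem]
      simp only [pv_lookupP1, List.mem_cons, List.not_mem_nil, or_false, and_or_left, exists_or]
    · rw [Bool.eq_iff_iff]
      simp only [decide_eq_true_eq, Bool.or_eq_true, List.mem_map, pv_matched_mem]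
      simp only [pv_lookupP2, List.mem_cons, List.not_mem_nil, or_false, and_or_left, exists_or]
    · rw [Bool.eq_iff_iff]
      simp only [decide_eq_true_eq, Bool.or_eq_true, List.mem_map, pv_matched_mem]
      simp only [pv_lookupP3, List.mem_cons, List.not_mem_nil, or_false, and_or_left, exists_or]
    · rw [Bool.eq_iff_iff]
      simp only [decide_eq_true_eq, Bool.or_eq_true, List.mem_map, pv_matched_mem]
      simp only [pv_lookupP4, List.mem_cons, List.not_mem_nil, or_false, and_or_left, exists_or]
    · rw [Bool.eq_iff_iff]
      simp only [decide_eq_true_eq, Bool.or_eq_true, List.mem_map, pv_matched_mem]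
      simp only [pv_lookupP5, List.mem_cons, List.not_mem_nil, or_false, and_or_left, exists_or]
  rw [pv_filter_map_pair _ _ _ _ _ _ hpair]
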